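-- pv_equiv track=rewrite | github.com/filojiston/codewars-solutions | columnize.py | columnize
-- ===== SOURCE A (Python) =====
-- from itertools import zip_longest
--
-- def columnize(items, columns_count):
--     if columns_count >= len(items):
--         return " | ".join(items)
--
--     columns = [[] for _ in range(columns_count)]
--     for i, item in enumerate(items):
--         columns[i % columns_count].append(item)
--
--     columns = list(map(column_formatter, columns))
--     columns = map(
--         lambda x: [y for y in x if not y is None], list(zip_longest(*columns))
--     )
--     return "\n".join(map(lambda x: " | ".join(x), columns))
--
-- def column_formatter(column):
--     max_len = max(map(len, column))
--     return list(map(lambda x: x.ljust(max_len), column))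
-- ===== SOURCE B (Python) =====
-- def columnize(items, columns_count):
--     n = len(items)
--     if columns_count >= n:
--         return " | ".join(items)
--     width = [max(len(items[k]) for k in range(j, n, columns_count))
--              for j in range(columns_count)]
--     nrows = -(-n // columns_count)
--     rows = []
--     for r in range(nrows):
--         start = r * columns_count
--         cells = [items[start + j].ljust(width[j])
--                  for j in range(columns_count) if start + j < n]
--         rows.append(" | ".join(cells))
--     return "\n".join(rows)
-- ===== Notes on version B (the rewrite author's own statement) =====
-- stated objective: alternative
-- what changed: B replaces A's distribute-into-column-lists / pad-per-column / zip_longest-transpose-and-filter pipeline by direct row-major construction: a per-column width table computed by strided index ranges, a closed-form row count ceil(n/c), and each output row built directly as items[r*c+j].ljust(width[j]).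
import Mathlib
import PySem

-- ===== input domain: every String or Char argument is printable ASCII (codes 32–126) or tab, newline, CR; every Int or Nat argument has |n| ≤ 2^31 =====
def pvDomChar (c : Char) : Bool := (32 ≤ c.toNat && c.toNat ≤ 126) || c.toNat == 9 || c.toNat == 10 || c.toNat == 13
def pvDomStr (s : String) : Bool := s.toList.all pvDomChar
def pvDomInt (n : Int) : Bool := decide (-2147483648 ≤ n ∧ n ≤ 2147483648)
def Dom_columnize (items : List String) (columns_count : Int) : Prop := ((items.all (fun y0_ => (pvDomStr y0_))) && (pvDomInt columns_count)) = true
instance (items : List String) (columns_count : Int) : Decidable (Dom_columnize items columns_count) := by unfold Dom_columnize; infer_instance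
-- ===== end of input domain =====

-- B builds the output row-by-row from a width table and a closed-form row count instead of
-- A's distribute/pad-columns/zip_longest-transpose pipeline (alternative decomposition, same cost).


-- shared helpers (ported Python built-ins used by both sides)
-- str.ljust(w): pad on the right with spaces to width w (exact for the space fill character)
def pvLjust (s : String) (w : Nat) : String :=
  String.ofList (s.toList ++ List.replicate (w - s.toList.length) ' ')

-- max(xs) for a nonempty list of naturals (Python max raises on []; both programs only
-- apply it to nonempty lists — the [] branch is unreachable there)
def pvMaxNat (l : List Nat) : Nat :=
  match l with
  | [] => 0
  | x :: t => t.foldl max x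

-- ===== PORT A =====
-- column_formatter: pad every entry of a column to the column's maximal length
def pvColumnFormatter (column : List String) : List String :=
  let maxLen := pvMaxNat (column.map (fun s => s.toList.length))
  column.map (fun s => pvLjust s maxLen)

def columnize (items : List String) (columns_count : Int) : String :=
  if PySem.List.len items ≤ columns_count then PySem.Str.join " | " items
  else
    -- columns = [[] for _ in range(columns_count)]; for i, item in enumerate(items): columns[i % columns_count].append(item)
    let cols := (PySem.List.enumerate items 0).foldl
      (fun cs p => cs.modify (PySem.Int.mod p.1 columns_count).toNat (fun col => col ++ [p.2]))
      (List.replicate columns_count.toNat ([] : List String))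
    let colsF := cols.map pvColumnFormatter
    -- zip_longest(*columns): max(len)-many rows, missing entries None; then the Nones are filtered out
    let numRows := pvMaxNat (colsF.map List.length)
    let rows := (List.range numRows).map (fun k => (colsF.map (fun col => col[k]?)).filterMap id)
    PySem.Str.join "\n" (rows.map (fun row => PySem.Str.join " | " row))

-- ===== PORT B =====
def columnize_alt (items : List String) (columns_count : Int) : String :=
  let n := PySem.List.len items
  if n ≤ columns_count then PySem.Str.join " | " items
  else
    -- width[j] = max(len(items[k]) for k in range(j, n, columns_count))
    let width := (PySem.List.pyRange 0 columns_count 1).map (fun j =>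
      pvMaxNat ((PySem.List.pyRange j n columns_count).map
        (fun k => (PySem.List.pyGetD items k "").toList.length)))
    -- nrows = -(-n // columns_count)
    let nrows := -(PySem.Int.floordiv (-n) columns_count)
    let rows := (PySem.List.pyRange 0 nrows 1).map (fun r =>
      PySem.Str.join " | "
        (((PySem.List.pyRange 0 columns_count 1).filter (fun j => decide (r * columns_count + j < n))).map
          (fun j => pvLjust (PySem.List.pyGetD items (r * columns_count + j) "")
                            (PySem.List.pyGetD width j 0))))
    PySem.Str.join "\n" rows

-- ===== PRECONDITION & SPEC =====
-- Pre_ excludes exactly the inputs where A raises: a NONEMPTY items with columns_count ≤ 0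
-- (ZeroDivisionError from i % 0, or IndexError into the empty column list for negative counts).
def Pre_columnize (items : List String) (columns_count : Int) : Prop :=
  items = [] ∨ 1 ≤ columns_count
instance (items : List String) (columns_count : Int) : Decidable (Pre_columnize items columns_count) := by
  unfold Pre_columnize; infer_instance
def pvWitness_columnize : List String × Int := (["ab", "c", "def"], 2)

def Spec_columnize (items : List String) (columns_count : Int) (out : String) : Prop := out = columnize_alt items columns_count
instance (items : List String) (columns_count : Int) (out : String) : Decidable (Spec_columnize items columns_count out) := by unfold Spec_columnize; infer_instance

-- ===== CLAIM (what is proved, stated in full; the proofs are below) =====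
def Claim_equal_columnize : Prop := ∀ (items : List String) (columns_count : Int), Dom_columnize items columns_count → Pre_columnize items columns_count → Spec_columnize items columns_count (columnize items columns_count)

-- ===== LEMMAS AND PROOFS =====

-- indices below M that fall in column j (A's distribution order for column j)
def colIdx (c j M : Nat) : List Nat := (List.range M).filter (fun i => decide (i % c = j))

theorem colIdx_succ (c j M : Nat) :
    colIdx c j (M + 1) = colIdx c j M ++ if M % c = j then [M] else [] := by
  simp only [colIdx, List.range_succ, List.filter_append, List.filter_singleton]
  split_ifs with h <;> simp [h]

theorem mem_colIdx (c j M i : Nat) : i ∈ colIdx c j M ↔ i < M ∧ i % c = j := by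
  simp [colIdx, List.mem_filter, List.mem_range]

theorem colIdx_eq_map_range (c j : Nat) (hc : 0 < c) (hj : j < c) (M : Nat) :
    colIdx c j M = (List.range (colIdx c j M).length).map (fun k => c * k + j) := by
  induction M with
  | zero => rfl
  | succ M ih =>
      rw [colIdx_succ]
      by_cases hMj : M % c = j
      · have hdm : c * (M / c) + j = M := by
          have := Nat.div_add_mod M c; omega
        have hq : (colIdx c j M).length = M / c := by
          apply le_antisymm
          · by_cases hq0 : (colIdx c j M).length = 0
            · rw [hq0]; exact Nat.zero_le _
            · set q := (colIdx c j M).length with hqdef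
              have hmem : c * (q - 1) + j ∈ colIdx c j M := by
                rw [ih]
                exact List.mem_map.mpr ⟨q - 1, List.mem_range.mpr (by omega), rfl⟩
              have hlt : c * (q - 1) + j < M := ((mem_colIdx c j M _).mp hmem).1
              have hmul : c * (q - 1) < c * (M / c) := by omega
              have : q - 1 < M / c := Nat.lt_of_mul_lt_mul_left hmul
              omega
          · set q := (colIdx c j M).length with hqdef
            by_contra hlt
            have hqlt : q < M / c := by omega
            have hin : c * q + j ∈ colIdx c j M := by
              rw [mem_colIdx]
              constructor
              · have : c * q < c * (M / c) := (Nat.mul_lt_mul_left hc).mpr hqlt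
                omega
              · rw [Nat.mul_add_mod]; exact Nat.mod_eq_of_lt hj
            rw [ih] at hin
            obtain ⟨k, hk, hke⟩ := List.mem_map.mp hin
            have : k = q := by
              have : c * k = c * q := by omega
              exact Nat.eq_of_mul_eq_mul_left (by omega) this
            rw [List.mem_range] at hk
            omega
        simp only [hMj, if_pos]
        rw [List.length_append, List.length_singleton, List.range_succ, List.map_append]
        rw [← ih]
        simp [hq, hdm]
      · simp only [hMj, if_neg, not_false_iff, List.append_nil]
        exact ih

theorem lt_colIdx_length_iff (c j : Nat) (hc : 0 < c) (hj : j < c) (M k : Nat) :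
    k < (colIdx c j M).length ↔ c * k + j < M := by
  constructor
  · intro hk
    have : c * k + j ∈ colIdx c j M := by
      rw [colIdx_eq_map_range c j hc hj M]
      exact List.mem_map.mpr ⟨k, List.mem_range.mpr hk, rfl⟩
    exact ((mem_colIdx c j M _).mp this).1
  · intro h
    have hin : c * k + j ∈ colIdx c j M := by
      rw [mem_colIdx]
      exact ⟨h, by rw [Nat.mul_add_mod]; exact Nat.mod_eq_of_lt hj⟩
    rw [colIdx_eq_map_range c j hc hj M] at hin
    obtain ⟨k', hk', hke⟩ := List.mem_map.mp hin
    have : k' = k := by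
      have : c * k' = c * k := by omega
      exact Nat.eq_of_mul_eq_mul_left (by omega) this
    rw [List.mem_range] at hk'
    omega

-- the generic "comprehension with a guard" shape
theorem filterMap_ite (l : List Nat) (P : Nat → Prop) [DecidablePred P] (G : Nat → String) :
    (l.map (fun j => if P j then some (G j) else none)).filterMap id
      = (l.filter (fun j => decide (P j))).map G := by
  rw [List.filterMap_map]
  simp only [Function.id_comp]
  induction l with
  | nil => rfl
  | cons x t ih => by_cases h : P x <;> simp [h, ih]

theorem foldl_max_of_le (x : Nat) (t : List Nat) (h : ∀ y ∈ t, y ≤ x) :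
    t.foldl max x = x := by
  induction t with
  | nil => rfl
  | cons y s ih =>
      have hy : y ≤ x := h y (by simp)
      simp only [List.foldl_cons, max_eq_left hy]
      exact ih (fun z hz => h z (by simp [hz]))

-- A's distribution fold, characterized
theorem colsA_eq (items : List String) (c : Nat) (hc : 0 < c) :
    (PySem.List.enumerate items 0).foldl
      (fun cs p => cs.modify (PySem.Int.mod p.1 (c : Int)).toNat (fun col => col ++ [p.2]))
      (List.replicate c ([] : List String))
    = (List.range c).map (fun j => (colIdx c j items.length).map (fun i => items.getD i "")) := by
  induction items using List.reverseRecOn with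
  | nil =>
      simp only [PySem.List.enumerate_nil, List.foldl_nil, List.length_nil]
      have : (List.range c).map (fun _ => ([] : List String)) = List.replicate c [] := by
        rw [show (fun (_ : Nat) => ([] : List String)) = Function.const Nat [] from rfl,
           List.map_const, List.length_range]
      rw [← this]
      apply List.map_congr_left
      intro j _
      simp [colIdx]
  | append_singleton xs x ih =>
      rw [PySem.List.enumerate_append, List.foldl_append, ih]
      simp only [PySem.List.enumerate_cons, PySem.List.enumerate_nil, List.foldl_cons, List.foldl_nil]
      have hmod : (PySem.Int.mod (0 + (xs.length : Int)) (c : Int)).toNat = xs.length % c := by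
        rw [zero_add, PySem.Int.mod_natCast, Int.toNat_natCast]
      rw [hmod]
      set m := xs.length with hm
      apply List.ext_getElem
      · simp
      · intro j hj1 hj2
        rw [List.length_modify, List.length_map, List.length_range] at hj1
        rw [List.getElem_modify]
        rw [List.getElem_map, List.getElem_range, List.getElem_map, List.getElem_range]
        have hlen : (xs ++ [x]).length = m + 1 := by simp [hm]
        rw [hlen, colIdx_succ]
        have hpref : (colIdx c j m).map (fun i => (xs ++ [x]).getD i "") = (colIdx c j m).map (fun i => xs.getD i "") := by
          apply List.map_congr_left
          intro i hi
          exact List.getD_append xs [x] "" i ((mem_colIdx c j m i).mp hi).1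
        by_cases hmj : m % c = j
        · rw [if_pos hmj, if_pos hmj, List.map_append, hpref]
          congr 1
          simp only [List.map_cons, List.map_nil]
          congr 1
          rw [List.getD_eq_getElem?_getD, hm, List.getElem?_concat_length]
          rfl
        · rw [if_neg hmj, if_neg hmj, List.append_nil, hpref]

theorem nat_eq_of_lt_iff (a b : Nat) (h : ∀ k, k < a ↔ k < b) : a = b := by
  have h1 := h a
  have h2 := h b
  omega

theorem Nj_eq (c j n : Nat) (hc : 0 < c) (hj : j < c) (hjn : j < n) :
    (((n : Int) - (j : Int) + (c : Int) - 1) / (c : Int)).toNat = (colIdx c j n).length := by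
  have hcast : ((n : Int) - (j : Int) + (c : Int) - 1) = ((n - j + c - 1 : Nat) : Int) := by omega
  rw [hcast, ← Int.natCast_div, Int.toNat_natCast]
  apply nat_eq_of_lt_iff
  intro k
  rw [lt_colIdx_length_iff c j hc hj n k]
  rw [Nat.lt_iff_add_one_le, Nat.le_div_iff_mul_le hc]
  have he : (k + 1) * c = c * k + c := by ring
  rw [he]
  have hck := Nat.zero_le (c * k)
  generalize c * k = p at *
  omega

theorem nrows_eq (c n : Nat) (hc : 0 < c) (hn : 0 < n) :
    -(PySem.Int.floordiv (-(n : Int)) (c : Int)) = ((colIdx c 0 n).length : Int) := by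
  set q := (colIdx c 0 n).length with hq
  have hchar : ∀ k, k < q ↔ c * k < n := by
    intro k
    have := lt_colIdx_length_iff c 0 hc hc n k
    simpa using this
  have hq1 : 1 ≤ q := by
    have := (hchar 0).mpr (by omega)
    omega
  have hub : n ≤ c * q := by
    have h2 : ¬ (c * q < n) := fun h => absurd ((hchar q).mpr h) (lt_irrefl q)
    omega
  have hlb : c * (q - 1) < n := by
    exact (hchar (q - 1)).mp (by omega)
  rw [PySem.Int.neg_floordiv_neg_eq_iff_of_pos (by exact_mod_cast hc)]
  constructor
  · have hcast : ((q : Int) - 1) = ((q - 1 : Nat) : Int) := by omega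
    rw [hcast]
    have : ((q - 1) * c : Nat) < n := by
      rw [Nat.mul_comm]; exact hlb
    exact_mod_cast this
  · have : n ≤ (q * c : Nat) := by rw [Nat.mul_comm]; exact hub
    exact_mod_cast this

-- proof-only abbreviations for the two else branches and the common normal form
def pvJoinA (cols : List (List String)) : String :=
  PySem.Str.join "\n" ((List.range (pvMaxNat ((cols.map pvColumnFormatter).map List.length))).map
    (fun k => PySem.Str.join " | " (((cols.map pvColumnFormatter).map (fun col => col[k]?)).filterMap id)))

def pvRowsB (items : List String) (cc : Int) (width : List Nat) : String :=
  PySem.Str.join "\n" ((PySem.List.pyRange 0 (-(PySem.Int.floordiv (-(PySem.List.len items)) cc)) 1).map (fun r =>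
    PySem.Str.join " | "
      (((PySem.List.pyRange 0 cc 1).filter (fun j => decide (r * cc + j < PySem.List.len items))).map
        (fun j => pvLjust (PySem.List.pyGetD items (r * cc + j) "") (PySem.List.pyGetD width j 0)))))

def wAux (items : List String) (c j : Nat) : Nat :=
  pvMaxNat (((colIdx c j items.length).map (fun i => items.getD i "")).map (fun s => s.toList.length))

def canonF (items : List String) (c : Nat) : String :=
  PySem.Str.join "\n" ((List.range (colIdx c 0 items.length).length).map (fun k =>
    PySem.Str.join " | " (((List.range c).filter (fun j => decide (c * k + j < items.length))).map
      (fun j => pvLjust (items.getD (c * k + j) "") (wAux items c j)))))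

theorem columnize_else (items : List String) (cc : Int) (h : ¬ (PySem.List.len items ≤ cc)) :
    columnize items cc = pvJoinA ((PySem.List.enumerate items 0).foldl
      (fun cs p => cs.modify (PySem.Int.mod p.1 cc).toNat (fun col => col ++ [p.2]))
      (List.replicate cc.toNat [])) := by
  simp only [columnize, pvJoinA]
  rw [if_neg h]
  simp only [List.map_map, Function.comp_def]

theorem columnize_alt_else (items : List String) (cc : Int) (h : ¬ (PySem.List.len items ≤ cc)) :
    columnize_alt items cc = pvRowsB items cc ((PySem.List.pyRange 0 cc 1).map (fun j =>
      pvMaxNat ((PySem.List.pyRange j (PySem.List.len items) cc).map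
        (fun k => (PySem.List.pyGetD items k "").toList.length)))) := by
  simp only [columnize_alt, pvRowsB]
  rw [if_neg h]

theorem getD_map_range {β : Type} (F : Nat → β) (c j : Nat) (hj : j < c) (d : β) :
    (List.map F (List.range c)).getD j d = F j := by
  rw [List.getD_eq_getElem?_getD, List.getElem?_map, List.getElem?_range hj]; rfl

theorem A_eq (items : List String) (c : Nat) (hc : 0 < c) (hcn : c < items.length) :
    pvJoinA ((List.range c).map
      (fun j => (colIdx c j items.length).map (fun i => items.getD i ""))) = canonF items c := by
  unfold pvJoinA canonF
  have hfmt : ∀ j, j < c →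
      pvColumnFormatter ((colIdx c j items.length).map (fun i => items.getD i "")) =
        (List.range (colIdx c j items.length).length).map
          (fun t => pvLjust (items.getD (c * t + j) "") (wAux items c j)) := by
    intro j hj
    simp only [pvColumnFormatter, wAux]
    rw [colIdx_eq_map_range c j hc hj items.length]
    simp [List.map_map, Function.comp_def]
  have h1 : List.map pvColumnFormatter ((List.range c).map
        (fun j => (colIdx c j items.length).map (fun i => items.getD i ""))) =
      (List.range c).map (fun j => (List.range (colIdx c j items.length).length).map
        (fun t => pvLjust (items.getD (c * t + j) "") (wAux items c j))) := by
    rw [List.map_map]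
    exact List.map_congr_left (fun j hj => hfmt j (List.mem_range.mp hj))
  rw [h1]
  -- row count
  have hnum : pvMaxNat ((List.range c).map (fun j => (List.range (colIdx c j items.length).length).map
        (fun t => pvLjust (items.getD (c * t + j) "") (wAux items c j))) |>.map List.length) =
      (colIdx c 0 items.length).length := by
    simp only [List.map_map, Function.comp_def, List.length_map, List.length_range]
    obtain ⟨c', rfl⟩ : ∃ c', c = c' + 1 := ⟨c - 1, by omega⟩
    rw [List.range_succ_eq_map, List.map_cons]
    simp only [pvMaxNat]
    apply foldl_max_of_le
    intro y hy
    rw [List.map_map] at hy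
    obtain ⟨j, hjm, rfl⟩ := List.mem_map.mp hy
    have hj1 : j + 1 < c' + 1 := by
      have := List.mem_range.mp hjm; omega
    simp only [Function.comp_def]
    rcases Nat.eq_zero_or_pos (colIdx (c' + 1) (j + 1) items.length).length with h0 | hpos
    · rw [h0]; exact Nat.zero_le _
    · set L := (colIdx (c' + 1) (j + 1) items.length).length with hL
      have hlt1 : (c' + 1) * (L - 1) + (j + 1) < items.length :=
        (lt_colIdx_length_iff (c' + 1) (j + 1) hc hj1 items.length (L - 1)).mp (by omega)
      have : L - 1 < (colIdx (c' + 1) 0 items.length).length :=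
        (lt_colIdx_length_iff (c' + 1) 0 hc hc items.length (L - 1)).mpr (by omega)
      omega
  rw [hnum]
  -- rows
  congr 1
  apply List.map_congr_left
  intro k _
  congr 1
  have hget : List.map (fun (col : List String) => col[k]?) ((List.range c).map
        (fun j => (List.range (colIdx c j items.length).length).map
          (fun t => pvLjust (items.getD (c * t + j) "") (wAux items c j)))) =
      (List.range c).map (fun j => if k < (colIdx c j items.length).length
        then some (pvLjust (items.getD (c * k + j) "") (wAux items c j)) else none) := by
    rw [List.map_map]
    apply List.map_congr_left
    intro j _
    simp only [Function.comp_def]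
    rw [List.getElem?_map]
    by_cases hk : k < (colIdx c j items.length).length
    · rw [List.getElem?_range hk]; simp [hk]
    · rw [List.getElem?_eq_none (by rw [List.length_range]; omega)]; simp [hk]
  rw [hget]
  rw [filterMap_ite (List.range c) (fun j => k < (colIdx c j items.length).length)
    (fun j => pvLjust (items.getD (c * k + j) "") (wAux items c j))]
  congr 1
  apply List.filter_congr
  intro j hj
  exact decide_eq_decide.mpr (lt_colIdx_length_iff c j hc (List.mem_range.mp hj) items.length k)

theorem B_eq (items : List String) (c : Nat) (hc : 0 < c) (hcn : c < items.length) :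
    pvRowsB items (c : Int) ((PySem.List.pyRange 0 (c : Int) 1).map (fun j =>
      pvMaxNat ((PySem.List.pyRange j (PySem.List.len items) (c : Int)).map
        (fun k => (PySem.List.pyGetD items k "").toList.length)))) = canonF items c := by
  have hn : 0 < items.length := by omega
  have hcast : ∀ (a b : Nat), (a : Int) * (c : Int) + (b : Int) = ((c * a + b : Nat) : Int) := by
    intro a b; push_cast; ring
  unfold pvRowsB canonF
  rw [PySem.List.len_eq items]
  rw [nrows_eq c items.length hc hn]
  rw [PySem.List.pyRange_zero_natCast ((colIdx c 0 items.length).length)]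
  rw [List.map_map]
  congr 1
  apply List.map_congr_left
  intro k _
  simp only [Function.comp_def]
  congr 1
  rw [PySem.List.pyRange_zero_natCast c, List.filter_map, List.map_map]
  have hfil : (List.range c).filter ((fun j => decide ((k : Int) * (c : Int) + j < (items.length : Int))) ∘ (fun (j : Nat) => (j : Int))) =
      (List.range c).filter (fun j => decide (c * k + j < items.length)) := by
    apply List.filter_congr
    intro j _
    simp only [Function.comp_def]
    apply decide_eq_decide.mpr
    rw [hcast k j]
    exact Nat.cast_lt
  rw [hfil]
  apply List.map_congr_left
  intro j hjf
  have hj : j < c := List.mem_range.mp (List.mem_filter.mp hjf).1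
  have hjn : j < items.length := lt_trans hj hcn
  simp only [Function.comp_def]
  rw [hcast k j, PySem.List.pyGetD_natCast]
  rw [List.map_map, PySem.List.pyGetD_natCast, getD_map_range _ c j hj]
  simp only [Function.comp_def]
  congr 1
  rw [PySem.List.pyRange_of_pos (j : Int) (items.length : Int) (by exact_mod_cast hc)]
  rw [if_pos (by exact_mod_cast hjn : (j : Int) < (items.length : Int))]
  rw [Nj_eq c j items.length hc hj hjn]
  rw [List.map_map]
  unfold wAux
  rw [colIdx_eq_map_range c j hc hj items.length]
  simp only [List.map_map, List.length_map, List.length_range]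
  congr 1
  apply List.map_congr_left
  intro t _
  simp only [Function.comp_def]
  rw [show ((j : Int) + (c : Int) * (t : Int)) = ((c * t + j : Nat) : Int) from by push_cast; ring,
     PySem.List.pyGetD_natCast]

theorem empty_case (cc : Int) (hcc : cc < 0) : columnize [] cc = columnize_alt [] cc := by
  have hg : ¬ (PySem.List.len ([] : List String) ≤ cc) := by
    rw [PySem.List.len_eq]; simp; omega
  rw [columnize_else _ _ hg, columnize_alt_else _ _ hg]
  unfold pvJoinA pvRowsB
  have h0 : cc.toNat = 0 := Int.toNat_of_nonpos (le_of_lt hcc)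
  simp [PySem.List.enumerate_nil, h0, pvMaxNat, PySem.List.len_eq, PySem.Int.floordiv,
    Int.zero_fdiv, PySem.List.pyRange_one_eq_nil (le_refl (0 : Int))]

-- ===== VERDICT (by name: the statement is the Claim_ definition above) =====
theorem columnize_spec : Claim_equal_columnize := by
  intro items cc _ hpre
  unfold Spec_columnize
  by_cases hg : PySem.List.len items ≤ cc
  · unfold columnize columnize_alt
    simp only [if_pos hg]
  · by_cases hnil : items = []
    · subst hnil
      have hneg : cc < 0 := by
        have := hg
        rw [PySem.List.len_eq] at this
        simp at this
        omega
      exact empty_case cc hneg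
    · have hcc1 : 1 ≤ cc := hpre.resolve_left hnil
      have hlt : cc < (items.length : Int) := by
        rw [PySem.List.len_eq] at hg
        simpa using (lt_of_not_ge hg)
      have hceq : cc = ((cc.toNat : Nat) : Int) := by omega
      rw [columnize_else items cc hg, columnize_alt_else items cc hg]
      rw [hceq]
      rw [Int.toNat_natCast]
      have hc : 0 < cc.toNat := by omega
      have hcn : cc.toNat < items.length := by omega
      rw [colsA_eq items cc.toNat hc]
      rw [A_eq items cc.toNat hc hcn, B_eq items cc.toNat hc hcn]
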